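-- pv_equiv track=rewrite | github.com/Kaens/format-re-tools | sigwars.py | DIESig
-- ===== SOURCE A (Python) =====
-- def DIESig(bs):
-- 	# creates a Detect It Easy signature from bytes
-- 	ansimin = 2 # how many characters an ansi sequence should have for the 'text' conversion to happen
-- 	s = '"'; s1 = ""
-- 	for b in bs:
-- 		if (0x20 <= b < 0x7F) and not (chr(b) in ["'",'"']):
-- 			s1 += chr(b)
-- 		else:
-- 			if len(s1) >= ansimin:
-- 				s += "'"+s1+"'"
-- 			elif s1 != "":
-- 				for q in s1:
-- 					s += f"{ord(q):02X}"
-- 			s1 = ""; s += f"{b:02X}"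
-- 	if len(s1) >= ansimin:
-- 		s += "'"+s1+"'"
-- 	elif len(s1)>0:
-- 		for q in s1:
-- 			s += f"{ord(q):02X}"
-- 	del s1; s = s.replace("''",""); s += '"'
-- 	return s
-- ===== SOURCE B (Python) =====
-- def DIESig(bs):
-- 	# creates a Detect It Easy signature from bytes (run-partition formulation)
-- 	def ansi(b):
-- 		return 0x20 <= b < 0x7F and b not in (0x27, 0x22)
-- 	parts = []
-- 	i, n = 0, len(bs)
-- 	while i < n:
-- 		b = bs[i]
-- 		if ansi(b):
-- 			j = i + 1
-- 			while j < n and ansi(bs[j]):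
-- 				j += 1
-- 			run = bs[i:j]
-- 			if len(run) >= 2:
-- 				parts.append("'" + "".join(map(chr, run)) + "'")
-- 			else:
-- 				parts.append(format(b, "02X"))
-- 			i = j
-- 		else:
-- 			parts.append(format(b, "02X"))
-- 			i += 1
-- 	return ('"' + "".join(parts)).replace("''", "") + '"'
-- ===== Notes on version B (the rewrite author's own statement) =====
-- stated objective: alternative
-- what changed: B partitions the bytes into maximal printable runs (two-pointer scan) and formats each run or byte as one part, instead of A's char-by-char loop with a pending-string accumulator and duplicated flush logic.
import Mathlib
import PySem

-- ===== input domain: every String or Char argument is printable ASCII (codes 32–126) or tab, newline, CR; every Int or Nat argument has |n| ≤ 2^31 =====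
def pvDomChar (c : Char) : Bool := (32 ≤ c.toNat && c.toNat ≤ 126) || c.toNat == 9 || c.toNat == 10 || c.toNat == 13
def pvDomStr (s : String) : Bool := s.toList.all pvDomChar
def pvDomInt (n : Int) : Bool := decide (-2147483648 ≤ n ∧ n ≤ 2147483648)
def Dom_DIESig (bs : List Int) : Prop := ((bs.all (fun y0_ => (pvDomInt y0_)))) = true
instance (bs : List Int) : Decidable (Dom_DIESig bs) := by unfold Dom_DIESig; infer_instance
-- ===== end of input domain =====

-- B rebuilds the signature from maximal printable runs (partition-then-format) instead of A's
-- char-by-char accumulator loop; objective: alternative decomposition, same cost.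

-- shared formatting helpers (Python's chr(b) and f"{b:02X}")
def pvChr (b : Int) : Char := Char.ofNat b.toNat

def pvHexDigit (n : Nat) : Char := if n < 10 then Char.ofNat (48 + n) else Char.ofNat (55 + n)

-- uppercase hex digits of n, most significant first; fuel-structured (fuel ≥ number of /16 steps)
def pvHexAux : Nat → Nat → List Char
  | 0, n => [pvHexDigit (n % 16)]
  | fuel + 1, n => if n < 16 then [pvHexDigit n] else pvHexAux fuel (n / 16) ++ [pvHexDigit (n % 16)]

def pvHexNat (n : Nat) : List Char := pvHexAux n n

-- f"{b:02X}": width 2, zero-padded; a negative sign counts toward the width (Python-exact)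
def pvHex2 (b : Int) : List Char :=
  if b < 0 then '-' :: pvHexNat b.natAbs
  else if b < 16 then '0' :: pvHexNat b.toNat
  else pvHexNat b.toNat

-- ===== PORT A =====
-- the flush A performs on s1 (both in the loop's else branch and in the epilogue)
def pvFlush (s s1 : List Char) : List Char :=
  if s1.length ≥ 2 then s ++ '\'' :: (s1 ++ ['\''])
  else if s1.length > 0 then s1.foldl (fun acc q => acc ++ pvHex2 ((q.toNat : Int))) s
  else s

def pvStepA (st : List Char × List Char) (b : Int) : List Char × List Char :=
  if decide (0x20 ≤ b ∧ b < 0x7F) && !(['\'', '"'].contains (pvChr b)) then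
    (st.1, st.2 ++ [pvChr b])
  else
    (pvFlush st.1 st.2 ++ pvHex2 b, [])

def DIESig (bs : List Int) : String :=
  let st := bs.foldl pvStepA (['"'], [])
  String.ofList (PySem.Chars.replace (pvFlush st.1 st.2) ['\'', '\''] [] ++ ['"'])

-- ===== PORT B =====
def pvIsAnsi (b : Int) : Bool := decide (0x20 ≤ b ∧ b < 0x7F) && !(b == 39) && !(b == 34)

-- maximal-run partition: one formatted part per run / non-printable byte
def pvParts : List Int → List (List Char)
  | [] => []
  | b :: rest =>
    if pvIsAnsi b then
      (if (b :: rest.takeWhile pvIsAnsi).length ≥ 2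
       then '\'' :: ((b :: rest.takeWhile pvIsAnsi).map pvChr ++ ['\''])
       else pvHex2 b) :: pvParts (rest.dropWhile pvIsAnsi)
    else pvHex2 b :: pvParts rest
termination_by bs => bs.length
decreasing_by
  · exact Nat.lt_succ_of_le (List.length_dropWhile_le _ _)
  · exact Nat.lt_succ_self _

def DIESig_alt (bs : List Int) : String :=
  String.ofList (PySem.Chars.replace ('"' :: (pvParts bs).flatten) ['\'', '\''] [] ++ ['"'])

-- ===== PRECONDITION & SPEC =====
def Spec_DIESig (bs : List Int) (out : String) : Prop := out = DIESig_alt bs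
instance (bs : List Int) (out : String) : Decidable (Spec_DIESig bs out) := by unfold Spec_DIESig; infer_instance

-- ===== CLAIM (what is proved, stated in full; the proofs are below) =====
def Claim_equal_DIESig : Prop := ∀ (bs : List Int), Dom_DIESig bs → Spec_DIESig bs (DIESig bs)

-- ===== LEMMAS AND PROOFS =====

-- A's loop condition agrees with B's byte-level printable test
theorem pv_ansi_cond (b : Int) :
    (decide (0x20 ≤ b ∧ b < 0x7F) && !(['\'', '"'].contains (pvChr b))) = pvIsAnsi b := by
  by_cases h : 0x20 ≤ b ∧ b < 0x7F
  · obtain ⟨h1, h2⟩ := h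
    interval_cases b <;> decide
  · have hd : decide (0x20 ≤ b ∧ b < 0x7F) = false := by simpa using h
    simp [pvIsAnsi, hd]

theorem pv_chr_toNat (b : Int) (h1 : 32 ≤ b) (h2 : b < 127) : ((pvChr b).toNat : Int) = b := by
  unfold pvChr
  interval_cases b <;> decide

theorem pv_hex_ord (b : Int) (h : pvIsAnsi b = true) :
    pvHex2 ((pvChr b).toNat : Int) = pvHex2 b := by
  have hb : 0x20 ≤ b ∧ b < 0x7F := by
    simp [pvIsAnsi] at h; exact h.1.1
  rw [pv_chr_toNat b hb.1 hb.2]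

-- flushing a pending all-printable run produces exactly B's parts for that run
theorem pv_flush_eq (r : List Int) (h : ∀ x ∈ r, pvIsAnsi x) (s : List Char) :
    pvFlush s (r.map pvChr) = s ++ (pvParts r).flatten := by
  match r with
  | [] => simp [pvFlush, pvParts]
  | [b] =>
    have hb : pvIsAnsi b = true := h b (by simp)
    simp [pvFlush, pvParts, hb, pv_hex_ord b hb]
  | b1 :: b2 :: t =>
    have hb1 : pvIsAnsi b1 = true := h b1 (by simp)
    have hall : ∀ x ∈ b2 :: t, pvIsAnsi x = true := fun x hx => h x (by simp [hx])
    rw [pvParts]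
    simp [pvFlush, hb1, List.takeWhile_eq_self_iff.mpr hall,
      List.dropWhile_eq_nil_iff.mpr hall, pvParts]

-- a non-printable byte after an all-printable run splits the partition
theorem pv_parts_split (r : List Int) (h : ∀ x ∈ r, pvIsAnsi x) (b : Int)
    (hb : pvIsAnsi b = false) (rest : List Int) :
    pvParts (r ++ b :: rest) = pvParts r ++ pvHex2 b :: pvParts rest := by
  match r with
  | [] => rw [List.nil_append, pvParts, pvParts]; simp [hb]
  | a :: t =>
    have ha : pvIsAnsi a = true := h a (by simp)
    have ht : ∀ x ∈ t, pvIsAnsi x = true := fun x hx => h x (by simp [hx])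
    have htw : (t ++ b :: rest).takeWhile pvIsAnsi = t := by
      rw [List.takeWhile_append_of_pos ht]
      simp [List.takeWhile, hb]
    have hdw : (t ++ b :: rest).dropWhile pvIsAnsi = b :: rest := by
      rw [List.dropWhile_append_of_pos ht]
      simp [List.dropWhile, hb]
    rw [List.cons_append, pvParts, pvParts]
    simp [ha, htw, hdw, List.takeWhile_eq_self_iff.mpr ht, List.dropWhile_eq_nil_iff.mpr ht,
      pvParts, hb]

-- main loop invariant: A's fold, with a pending printable run r, finishes to B's partition output
theorem pv_loop_eq (bs : List Int) : ∀ (r : List Int), (∀ x ∈ r, pvIsAnsi x) → ∀ s : List Char,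
    pvFlush (bs.foldl pvStepA (s, r.map pvChr)).1 (bs.foldl pvStepA (s, r.map pvChr)).2
      = s ++ (pvParts (r ++ bs)).flatten := by
  induction bs with
  | nil =>
    intro r h s
    simpa using pv_flush_eq r h s
  | cons b rest ih =>
    intro r h s
    rw [List.foldl_cons]
    have hstep : pvStepA (s, r.map pvChr) b =
        if pvIsAnsi b then (s, r.map pvChr ++ [pvChr b])
        else (pvFlush s (r.map pvChr) ++ pvHex2 b, []) := by
      rw [pvStepA, pv_ansi_cond]
    cases hb : pvIsAnsi b with
    | true =>
      rw [hstep, if_pos hb]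
      have h' : ∀ x ∈ r ++ [b], pvIsAnsi x := by
        intro x hx
        rcases List.mem_append.mp hx with hx | hx
        · exact h x hx
        · simp at hx; subst hx; exact hb
      have := ih (r ++ [b]) h' s
      rw [List.map_append] at this
      simpa [List.append_assoc] using this
    | false =>
      rw [hstep, if_neg (by simp [hb])]
      have := ih [] (by simp) (pvFlush s (r.map pvChr) ++ pvHex2 b)
      simp only [List.map_nil, List.nil_append] at this
      rw [this, pv_parts_split r h b hb rest, pv_flush_eq r h s]
      simp [List.append_assoc]

-- ===== VERDICT (by name: the statement is the Claim_ definition above) =====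
theorem DIESig_spec : Claim_equal_DIESig := by
  intro bs _
  unfold Spec_DIESig DIESig DIESig_alt
  have := pv_loop_eq bs [] (by simp) ['"']
  simp only [List.map_nil, List.nil_append] at this
  show String.ofList _ = _
  rw [this]
  rfl
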